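-- pv_equiv track=rewrite | github.com/q5438722/intent_formalization | src/utils/pipeline_common.py | extract_spec_portion
-- ===== SOURCE A (Python) =====
-- def extract_spec_portion(source_text: str, max_lines: int = 400) -> str:
--     """For large files, extract spec-relevant portions with context."""
--     lines = source_text.split('\n')
--     if len(lines) <= max_lines:
--         return source_text
--
--     spec_keywords = ['requires', 'ensures', 'invariant', 'recommends', 'spec fn',
--                      'proof fn', 'pub fn', 'fn ', 'struct ', 'impl ', 'trait ',
--                      'decreases', 'open spec', 'closed spec',
--                      'pub proof', 'pub open spec', 'pub closed spec', 'enum ']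
--     important = set()
--     for i, line in enumerate(lines):
--         low = line.lower().strip()
--         if any(kw in low for kw in spec_keywords):
--             for j in range(max(0, i - 3), min(len(lines), i + 8)):
--                 important.add(j)
--
--     # Always include first 30 and last 5 lines
--     for i in range(min(30, len(lines))):
--         important.add(i)
--     for i in range(max(0, len(lines) - 5), len(lines)):
--         important.add(i)
--
--     selected = sorted(important)[:max_lines]
--     result = []
--     prev = -2
--     for i in selected:
--         if i > prev + 1:
--             result.append(f"// ... (lines {prev+2}-{i-1} omitted) ...")
--         result.append(lines[i])
--         prev = i
--     return '\n'.join(result)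
-- ===== SOURCE B (Python) =====
-- def extract_spec_portion(source_text: str, max_lines: int = 400) -> str:
--     """Interval-merge re-implementation: build [start,stop) windows, merge, flatten."""
--     lines = source_text.split('\n')
--     n = len(lines)
--     if n <= max_lines:
--         return source_text
--
--     spec_keywords = ['requires', 'ensures', 'invariant', 'recommends', 'spec fn',
--                      'proof fn', 'pub fn', 'fn ', 'struct ', 'impl ', 'trait ',
--                      'decreases', 'open spec', 'closed spec',
--                      'pub proof', 'pub open spec', 'pub closed spec', 'enum ']
--
--     intervals = [(0, min(30, n)), (max(0, n - 5), n)]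
--     for i, line in enumerate(lines):
--         low = line.lower().strip()
--         if any(kw in low for kw in spec_keywords):
--             intervals.append((max(0, i - 3), min(n, i + 8)))
--     intervals.sort(key=lambda t: t[0])
--
--     def merge(ivs):
--         if len(ivs) >= 2 and ivs[1][0] <= ivs[0][1]:
--             return merge([(ivs[0][0], max(ivs[0][1], ivs[1][1]))] + ivs[2:])
--         if ivs:
--             return [ivs[0]] + merge(ivs[1:])
--         return []
--
--     idxs = [j for a, b in merge(intervals) for j in range(a, b)]
--     selected = idxs[:max_lines]
--
--     result = []
--     prev = -2
--     for i in selected: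
--         if i > prev + 1:
--             result.append(f"// ... (lines {prev+2}-{i-1} omitted) ...")
--         result.append(lines[i])
--         prev = i
--     return '\n'.join(result)
-- ===== Notes on version B (the rewrite author's own statement) =====
-- stated objective: alternative
-- what changed: B keeps a list of half-open [start,stop) intervals (two base windows plus one window per keyword line), sorts them by start and merges overlapping/adjacent ones, then flattens the merged blocks into the ordered index stream, instead of A's set of individual line indices filled index-by-index and then sorted.
import Mathlib
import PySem

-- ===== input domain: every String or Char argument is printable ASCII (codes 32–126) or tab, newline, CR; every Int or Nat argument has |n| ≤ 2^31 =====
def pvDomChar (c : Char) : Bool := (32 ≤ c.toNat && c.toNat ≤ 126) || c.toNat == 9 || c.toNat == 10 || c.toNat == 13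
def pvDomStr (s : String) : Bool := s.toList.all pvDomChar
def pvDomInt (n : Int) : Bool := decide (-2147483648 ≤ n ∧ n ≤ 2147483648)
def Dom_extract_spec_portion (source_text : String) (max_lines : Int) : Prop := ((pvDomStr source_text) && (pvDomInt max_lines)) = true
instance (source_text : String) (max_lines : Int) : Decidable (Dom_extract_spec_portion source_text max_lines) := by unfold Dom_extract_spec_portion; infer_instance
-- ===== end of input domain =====

-- B replaces A's per-line set of individual line indices (filled index by index, then sorted) by a
-- list of half-open intervals sorted by start and merged; same return value, different data structure.

-- shared by both Pythons verbatim: the keyword list, the keyword test, and the final emission loop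
def pvSpecKeywords : List String :=
  ["requires", "ensures", "invariant", "recommends", "spec fn",
   "proof fn", "pub fn", "fn ", "struct ", "impl ", "trait ",
   "decreases", "open spec", "closed spec",
   "pub proof", "pub open spec", "pub closed spec", "enum "]

def pvIsSpecLine (line : String) : Bool :=
  pvSpecKeywords.any (fun kw => PySem.Str.isIn kw (PySem.Str.strip (PySem.Str.lower line)))

-- the result/prev emission loop + '\n'.join, identical in A and B
def pvEmit (lines : List String) (selected : List Int) : String :=
  let st := selected.foldl (fun (st : List String × Int) i =>
    let res := if st.2 + 1 < i then
        st.1 ++ ["// ... (lines " ++ PySem.Int.toStr (st.2 + 2) ++ "-" ++ PySem.Int.toStr (i - 1) ++ " omitted) ..."]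
      else st.1
    (res ++ [PySem.List.pyGetD lines i ""], i)) (([] : List String), (-2 : Int))
  PySem.Str.join "\n" st.1

-- ===== PORT A =====
-- A's 'important' set: keyword windows added index by index, then first 30 / last 5 lines
def pvImportant (lines : List String) : PySem.Set Int :=
  let s : PySem.Set Int :=
    (PySem.List.enumerate lines 0).foldl (fun s p =>
      if pvIsSpecLine p.2 then
        (PySem.List.pyRange (max 0 (p.1 - 3)) (min (lines.length : Int) (p.1 + 8)) 1).foldl
          (fun s j => PySem.Set.add s j) s
      else s) PySem.Set.empty
  let s := (PySem.List.pyRange 0 (min 30 (lines.length : Int)) 1).foldl (fun s j => PySem.Set.add s j) s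
  (PySem.List.pyRange (max 0 ((lines.length : Int) - 5)) (lines.length : Int) 1).foldl
    (fun s j => PySem.Set.add s j) s

def extract_spec_portion (source_text : String) (max_lines : Int) : String :=
  let lines := (PySem.Str.split? source_text "\n").getD []   -- sep "\n" ≠ "": split? is some here
  if (lines.length : Int) ≤ max_lines then source_text
  else
    pvEmit lines
      (PySem.List.slice (PySem.List.sorted (pvImportant lines) (fun x => x)) none (some max_lines))

-- ===== PORT B =====
-- B's interval list: [first-30] , [last-5] , then one window per keyword line
def pvIntervals (lines : List String) : List (Int × Int) :=
  (PySem.List.enumerate lines 0).foldl (fun acc p =>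
      if pvIsSpecLine p.2 then
        acc ++ [(max 0 (p.1 - 3), min (lines.length : Int) (p.1 + 8))]
      else acc)
    [((0 : Int), min 30 (lines.length : Int)), (max 0 ((lines.length : Int) - 5), (lines.length : Int))]

-- merge a start-sorted interval list into disjoint blocks
def pvMergeIv : List (Int × Int) → List (Int × Int)
  | [] => []
  | [iv] => [iv]
  | iv1 :: iv2 :: rest =>
    if iv2.1 ≤ iv1.2 then pvMergeIv ((iv1.1, max iv1.2 iv2.2) :: rest)
    else iv1 :: pvMergeIv (iv2 :: rest)
  termination_by l => l.length

def extract_spec_portion_alt (source_text : String) (max_lines : Int) : String :=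
  let lines := (PySem.Str.split? source_text "\n").getD []   -- sep "\n" ≠ "": split? is some here
  if (lines.length : Int) ≤ max_lines then source_text
  else
    pvEmit lines
      (PySem.List.slice
        ((pvMergeIv (PySem.List.sorted (pvIntervals lines) (fun t => t.1))).flatMap
          (fun p => PySem.List.pyRange p.1 p.2 1))
        none (some max_lines))

-- ===== PRECONDITION & SPEC =====
def Spec_extract_spec_portion (source_text : String) (max_lines : Int) (out : String) : Prop := out = extract_spec_portion_alt source_text max_lines
instance (source_text : String) (max_lines : Int) (out : String) : Decidable (Spec_extract_spec_portion source_text max_lines out) := by unfold Spec_extract_spec_portion; infer_instance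

-- ===== CLAIM (what is proved, stated in full; the proofs are below) =====
def Claim_equal_extract_spec_portion : Prop := ∀ (source_text : String) (max_lines : Int), Dom_extract_spec_portion source_text max_lines → Spec_extract_spec_portion source_text max_lines (extract_spec_portion source_text max_lines)

-- ===== LEMMAS AND PROOFS =====

-- split('\n') never returns the empty list
theorem pvGo_ne_nil (sep : List Char) (fuel : Nat) : ∀ (l cur : List Char) (acc : List (List Char)),
    PySem.Chars.splitOn.go sep fuel l cur acc ≠ [] := by
  induction fuel with
  | zero => intro l cur acc; simp [PySem.Chars.splitOn.go]
  | succ n ih =>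
    intro l cur acc
    cases l with
    | nil => simp [PySem.Chars.splitOn.go]
    | cons c rest =>
      rw [PySem.Chars.splitOn.go]
      split_ifs <;> apply ih

theorem pvSplit_ne_nil (s : String) : (PySem.Str.split? s "\n").getD [] ≠ [] := by
  simp only [PySem.Str.split?, PySem.Chars.split?, List.isEmpty]
  intro h
  simp at h
  rw [PySem.Chars.splitOn] at h
  exact pvGo_ne_nil _ _ _ _ _ h

-- membership in A's keyword-window fold
theorem pvMemAddLoop (m : Int) (l : List (Int × String)) (s : PySem.Set Int) (j : Int) :
    j ∈ l.foldl (fun s p =>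
      if pvIsSpecLine p.2 then
        (PySem.List.pyRange (max 0 (p.1 - 3)) (min m (p.1 + 8)) 1).foldl
          (fun s j => PySem.Set.add s j) s
      else s) s ↔
    j ∈ s ∨ ∃ p ∈ l, pvIsSpecLine p.2 ∧ max 0 (p.1 - 3) ≤ j ∧ j < min m (p.1 + 8) := by
  induction l generalizing s with
  | nil => simp
  | cons p t ih =>
    simp only [List.foldl_cons]
    by_cases hp : pvIsSpecLine p.2
    · rw [hp, if_pos rfl, ih]
      have := PySem.Set.mem_foldl_add (PySem.List.pyRange (max 0 (p.1 - 3)) (min m (p.1 + 8)) 1) (fun x => x) s j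
      simp only [this, PySem.List.mem_pyRange_one]
      constructor
      · rintro (⟨hs | ⟨b, hb, rfl⟩⟩ | ⟨q, hq, h1, h2⟩)
        · exact Or.inl hs
        · exact Or.inr ⟨p, List.mem_cons_self, hp, hb.1, hb.2⟩
        · exact Or.inr ⟨q, List.mem_cons_of_mem _ hq, h1, h2⟩
      · rintro (hs | ⟨q, hq, h1, h2, h3⟩)
        · exact Or.inl (Or.inl hs)
        · rcases List.mem_cons.mp hq with rfl | hq
          · exact Or.inl (Or.inr ⟨j, ⟨h2, h3⟩, rfl⟩)
          · exact Or.inr ⟨q, hq, h1, h2, h3⟩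
    · simp only [hp]
      rw [if_neg (by simp), ih]
      constructor
      · rintro (hs | ⟨q, hq, h1, h2⟩)
        · exact Or.inl hs
        · exact Or.inr ⟨q, List.mem_cons_of_mem _ hq, h1, h2⟩
      · rintro (hs | ⟨q, hq, h1, h2, h3⟩)
        · exact Or.inl hs
        · rcases List.mem_cons.mp hq with rfl | hq
          · exact absurd h1 hp
          · exact Or.inr ⟨q, hq, h1, h2, h3⟩

-- every add-loop keeps the set Nodup
theorem pvNodupAddLoop (l : List Int) (s : PySem.Set Int) (h : s.Nodup) :
    (l.foldl (fun s j => PySem.Set.add s j) s).Nodup := by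
  have heq : l.foldl (fun s j => PySem.Set.add s j) s = PySem.Set.update s l := rfl
  rw [heq]; exact PySem.Set.nodup_update s l h

theorem pvNodupOuter (m : Int) (l : List (Int × String)) (s : PySem.Set Int) (h : s.Nodup) :
    (l.foldl (fun s p =>
      if pvIsSpecLine p.2 then
        (PySem.List.pyRange (max 0 (p.1 - 3)) (min m (p.1 + 8)) 1).foldl
          (fun s j => PySem.Set.add s j) s
      else s) s).Nodup := by
  induction l generalizing s with
  | nil => exact h
  | cons p t ih =>
    simp only [List.foldl_cons]
    apply ih
    split_ifs
    · exact pvNodupAddLoop _ _ h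
    · exact h

theorem pvNodupImportant (lines : List String) : (pvImportant lines).Nodup := by
  unfold pvImportant
  apply pvNodupAddLoop
  apply pvNodupAddLoop
  apply pvNodupOuter
  simp [PySem.Set.empty]

-- B's interval list is the two base windows plus one window per keyword line
theorem pvIntervalsEq (lines : List String) :
    pvIntervals lines =
    [((0 : Int), min 30 (lines.length : Int)), (max 0 ((lines.length : Int) - 5), (lines.length : Int))] ++
      (((PySem.List.enumerate lines 0).filter (fun p => pvIsSpecLine p.2)).map
        (fun p => (max 0 (p.1 - 3), min (lines.length : Int) (p.1 + 8)))) := by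
  unfold pvIntervals
  rw [PySem.List.foldl_append_if]

-- membership in A's important set = membership in the union of B's intervals
theorem pvMemImportant (lines : List String) (j : Int) :
    j ∈ pvImportant lines ↔ ∃ iv ∈ pvIntervals lines, iv.1 ≤ j ∧ j < iv.2 := by
  unfold pvImportant
  rw [PySem.Set.mem_foldl_add _ (fun x => x), PySem.Set.mem_foldl_add _ (fun x => x),
    pvMemAddLoop, pvIntervalsEq]
  simp only [PySem.List.mem_pyRange_one, List.mem_append, List.mem_cons, List.mem_map,
    List.mem_filter, PySem.Set.empty, List.not_mem_nil, false_or, or_false]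
  constructor
  · rintro ((⟨q, hq, hsp, h1, h2⟩ | ⟨b, hb, rfl⟩) | ⟨b, hb, rfl⟩)
    · exact ⟨_, Or.inr ⟨q, ⟨hq, hsp⟩, rfl⟩, h1, h2⟩
    · exact ⟨_, Or.inl (Or.inl rfl), hb.1, hb.2⟩
    · exact ⟨_, Or.inl (Or.inr rfl), hb.1, hb.2⟩
  · rintro ⟨iv, (rfl | rfl) | ⟨q, ⟨hq, hsp⟩, rfl⟩, h1, h2⟩  -- two base windows or a keyword window
    · exact Or.inl (Or.inr ⟨j, ⟨h1, h2⟩, rfl⟩)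
    · exact Or.inr ⟨j, ⟨h1, h2⟩, rfl⟩
    · exact Or.inl (Or.inl ⟨q, hq, hsp, h1, h2⟩)

-- B's intervals are all nonempty
theorem pvIntervalsShape (lines : List String) (hne : lines ≠ []) :
    ∀ iv ∈ pvIntervals lines, iv.1 < iv.2 := by
  have hlen : 1 ≤ (lines.length : Int) := by
    have := List.length_pos_iff.mpr hne
    omega
  rw [pvIntervalsEq]
  intro iv hm
  simp only [List.mem_append, List.mem_cons, List.mem_map, List.mem_filter,
    List.not_mem_nil, or_false] at hm
  rcases hm with (rfl | rfl) | ⟨q, ⟨hq, _⟩, rfl⟩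
  · simp only []; omega
  · simp only []; omega
  · rcases (PySem.List.mem_enumerate_iff _ _ _).mp hq with ⟨k, hk, rfl⟩
    simp only []
    have : ((0 : Int) + k) < (lines.length : Int) := by
      have : (k : Int) < (lines.length : Int) := by exact_mod_cast hk
      omega
    omega

-- merging preserves the union
theorem pvMergeMem (l : List (Int × Int)) (j : Int) :
    l.Pairwise (fun u v => u.1 ≤ v.1) →
    ((∃ iv ∈ pvMergeIv l, iv.1 ≤ j ∧ j < iv.2) ↔ ∃ iv ∈ l, iv.1 ≤ j ∧ j < iv.2) := by
  fun_induction pvMergeIv l with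
  | case1 => simp
  | case2 iv => simp
  | case3 iv1 iv2 rest hc ih =>
    intro hs
    rw [ih]
    · constructor
      · rintro ⟨iv, hm, h1, h2⟩
        rcases List.mem_cons.mp hm with rfl | hm
        · simp only [] at h1 h2
          by_cases hj : j < iv1.2
          · exact ⟨iv1, List.mem_cons_self, h1, hj⟩
          · refine ⟨iv2, by simp, by omega, by omega⟩
        · exact ⟨iv, by simp [hm], h1, h2⟩
      · rintro ⟨iv, hm, h1, h2⟩
        rcases List.mem_cons.mp hm with heq | hm
        · subst heq
          exact ⟨(iv.1, max iv.2 iv2.2), List.mem_cons_self, h1, by simp only []; omega⟩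
        · rcases List.mem_cons.mp hm with heq | hm
          · subst heq
            have hle : iv1.1 ≤ iv.1 := (List.pairwise_cons.mp hs).1 iv List.mem_cons_self
            exact ⟨(iv1.1, max iv1.2 iv.2), List.mem_cons_self, by simp only []; omega,
              by simp only []; omega⟩
          · exact ⟨iv, by simp [hm], h1, h2⟩
    · rcases List.pairwise_cons.mp hs with ⟨h1, hs2⟩
      rcases List.pairwise_cons.mp hs2 with ⟨h2, hs3⟩
      exact List.pairwise_cons.mpr ⟨fun v hv => h1 v (by simp [hv]), hs3⟩
  | case4 iv1 iv2 rest hc ih =>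
    intro hs
    rcases List.pairwise_cons.mp hs with ⟨h1, hs2⟩
    constructor
    · rintro ⟨iv, hm, ha, hb⟩
      rcases List.mem_cons.mp hm with heq | hm
      · subst heq; exact ⟨iv, List.mem_cons_self, ha, hb⟩
      · rcases (ih hs2).mp ⟨iv, hm, ha, hb⟩ with ⟨iv', hm', ha', hb'⟩
        exact ⟨iv', List.mem_cons_of_mem _ hm', ha', hb'⟩
    · rintro ⟨iv, hm, ha, hb⟩
      rcases List.mem_cons.mp hm with heq | hm
      · subst heq; exact ⟨iv, List.mem_cons_self, ha, hb⟩
      · rcases (ih hs2).mpr ⟨iv, hm, ha, hb⟩ with ⟨iv', hm', ha', hb'⟩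
        exact ⟨iv', List.mem_cons_of_mem _ hm', ha', hb'⟩

-- every merged start is one of the original starts
theorem pvMergeFst (l : List (Int × Int)) : ∀ iv' ∈ pvMergeIv l, iv'.1 ∈ l.map Prod.fst := by
  fun_induction pvMergeIv l with
  | case1 => simp
  | case2 iv => simp
  | case3 iv1 iv2 rest h ih =>
    intro iv' hm
    have := ih iv' hm
    simp at this ⊢
    tauto
  | case4 iv1 iv2 rest h ih =>
    intro iv' hm
    rcases List.mem_cons.mp hm with rfl | hm
    · simp
    · have := ih iv' hm
      simp at this ⊢
      tauto

theorem pvMergeNonempty (l : List (Int × Int)) (h : ∀ iv ∈ l, iv.1 < iv.2) :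
    ∀ iv ∈ pvMergeIv l, iv.1 < iv.2 := by
  fun_induction pvMergeIv l with
  | case1 => simp
  | case2 iv => intro iv' hm; rcases List.mem_singleton.mp hm with rfl; exact h _ List.mem_cons_self
  | case3 iv1 iv2 rest hc ih =>
    apply ih
    intro iv hm
    rcases List.mem_cons.mp hm with rfl | hm
    · have h1 := h iv1 List.mem_cons_self
      simp only []
      omega
    · exact h iv (by simp [hm])
  | case4 iv1 iv2 rest hc ih =>
    intro iv hm
    rcases List.mem_cons.mp hm with rfl | hm
    · exact h iv List.mem_cons_self
    · exact ih (fun iv hm => h iv (by simp at hm ⊢; tauto)) iv hm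

-- merged blocks are separated by a real gap
theorem pvMergePairwise (l : List (Int × Int)) :
    l.Pairwise (fun u v => u.1 ≤ v.1) →
    (pvMergeIv l).Pairwise (fun u v => u.2 < v.1) := by
  fun_induction pvMergeIv l with
  | case1 => simp
  | case2 iv => simp
  | case3 iv1 iv2 rest hc ih =>
    intro hs
    apply ih
    rcases List.pairwise_cons.mp hs with ⟨h1, hs2⟩
    rcases List.pairwise_cons.mp hs2 with ⟨h2, hs3⟩
    exact List.pairwise_cons.mpr ⟨fun v hv => h1 v (by simp [hv]), hs3⟩
  | case4 iv1 iv2 rest hc ih =>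
    intro hs
    rcases List.pairwise_cons.mp hs with ⟨h1, hs2⟩
    refine List.pairwise_cons.mpr ⟨?_, ih hs2⟩
    intro v hv
    have hfst := pvMergeFst _ v hv
    simp only [List.map_cons, List.mem_cons, List.mem_map] at hfst
    rcases hfst with heq | hfst
    · omega
    · rcases hfst with ⟨w, hw, heq⟩
      have := (List.pairwise_cons.mp hs2).1 w hw
      omega

-- the heart: A's sorted set of indices IS B's flattened merged intervals
theorem pvSelectedEq (lines : List String) (hne : lines ≠ []) :
    PySem.List.sorted (pvImportant lines) (fun x => x) =
    (pvMergeIv (PySem.List.sorted (pvIntervals lines) (fun t => t.1))).flatMap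
      (fun p => PySem.List.pyRange p.1 p.2 1) := by
  have hsorted : (PySem.List.sorted (pvIntervals lines) (fun t => t.1)).Pairwise
      (fun u v => u.1 ≤ v.1) := PySem.List.sorted_pairwise _ _
  have hmemSorted : ∀ iv, iv ∈ PySem.List.sorted (pvIntervals lines) (fun t => t.1) ↔
      iv ∈ pvIntervals lines := fun iv => PySem.List.mem_sorted _ _ _ iv
  have hnonempty : ∀ iv ∈ PySem.List.sorted (pvIntervals lines) (fun t => t.1), iv.1 < iv.2 :=
    fun iv hm => pvIntervalsShape lines hne iv ((hmemSorted iv).mp hm)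
  have hgap := pvMergePairwise _ hsorted
  have hne' := pvMergeNonempty _ hnonempty
  have hpair : ((pvMergeIv (PySem.List.sorted (pvIntervals lines) (fun t => t.1))).flatMap
      (fun p => PySem.List.pyRange p.1 p.2 1)).Pairwise (· < ·) := by
    rw [List.pairwise_flatMap]
    refine ⟨fun a _ => PySem.List.pairwise_lt_pyRange_one _ _, ?_⟩
    refine hgap.imp ?_
    intro u v huv x hx y hy
    rw [PySem.List.mem_pyRange_one] at hx hy
    omega
  apply PySem.List.sorted_eq_of_perm_of_pairwise_lt
  · rw [List.perm_ext_iff_of_nodup (hpair.imp (fun h => ne_of_lt h)) (pvNodupImportant lines)]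
    intro j
    rw [List.mem_flatMap, pvMemImportant]
    constructor
    · rintro ⟨iv, hm, hj⟩
      rw [PySem.List.mem_pyRange_one] at hj
      rcases (pvMergeMem _ j hsorted).mp ⟨iv, hm, hj⟩ with ⟨iv', hm', h'⟩
      exact ⟨iv', (hmemSorted iv').mp hm', h'⟩
    · rintro ⟨iv, hm, hj⟩
      rcases (pvMergeMem _ j hsorted).mpr ⟨iv, (hmemSorted iv).mpr hm, hj⟩ with ⟨iv', hm', h'⟩
      exact ⟨iv', hm', PySem.List.mem_pyRange_one.mpr h'⟩
  · exact hpair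

-- ===== VERDICT (by name: the statement is the Claim_ definition above) =====
theorem extract_spec_portion_spec : Claim_equal_extract_spec_portion := by
  intro source_text max_lines _
  unfold Spec_extract_spec_portion extract_spec_portion extract_spec_portion_alt
  have hne := pvSplit_ne_nil source_text
  simp only []
  split_ifs
  · rfl
  · rw [pvSelectedEq _ hne]
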